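-- pv_equiv track=rewrite | github.com/damiankiwi/kurs_python | 19/020.py | okresl_kierunek_monotonicznej_sekwencji
-- ===== SOURCE A (Python) =====
-- def okresl_kierunek_monotonicznej_sekwencji(sekwencja):
--     rosnaca = all(sekwencja[i] <= sekwencja[i + 1] for i in range(len(sekwencja) - 1))
--     malejaca = all(sekwencja[i] >= sekwencja[i + 1] for i in range(len(sekwencja) - 1))
--
--     if rosnaca and not malejaca:
--         return "Rosnący."
--     elif malejaca and not rosnaca:
--         return "Malejący."
--     else:
--         return "Nie jest to monotoniczna sekwencja!"
-- ===== SOURCE B (Python) =====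
-- def okresl_kierunek_monotonicznej_sekwencji(sekwencja):
--     saw_up = False
--     saw_down = False
--     for x, y in zip(sekwencja, sekwencja[1:]):
--         if x < y:
--             saw_up = True
--         elif x > y:
--             saw_down = True
--     if saw_up and not saw_down:
--         return "Rosnący."
--     if saw_down and not saw_up:
--         return "Malejący."
--     return "Nie jest to monotoniczna sekwencja!"
-- ===== Notes on version B (the rewrite author's own statement) =====
-- stated objective: faster
-- what changed: Replaces A's two full all(...) index passes with one fused pass over adjacent pairs (zip) that sets two flags, deciding the branch from the flags.
import Mathlib
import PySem

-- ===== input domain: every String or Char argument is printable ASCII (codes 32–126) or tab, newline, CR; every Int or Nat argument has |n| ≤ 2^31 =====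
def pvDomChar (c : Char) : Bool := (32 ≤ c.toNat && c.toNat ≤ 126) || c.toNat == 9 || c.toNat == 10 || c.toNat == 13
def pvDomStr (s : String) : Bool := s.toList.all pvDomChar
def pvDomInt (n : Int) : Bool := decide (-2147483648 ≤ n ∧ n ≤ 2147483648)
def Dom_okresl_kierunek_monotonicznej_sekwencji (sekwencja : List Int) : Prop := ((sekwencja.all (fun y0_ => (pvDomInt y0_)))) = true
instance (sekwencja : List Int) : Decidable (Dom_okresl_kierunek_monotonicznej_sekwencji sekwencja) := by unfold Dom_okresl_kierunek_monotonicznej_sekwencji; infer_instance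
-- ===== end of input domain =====

-- B fuses A's two all(...) passes into one flag-setting pass over adjacent pairs; same return value.

-- ===== PORT A =====
-- indices i and i+1 are always in range for i in range(len(s)-1), so pyGetD is exact here
def okresl_kierunek_monotonicznej_sekwencji (sekwencja : List Int) : String :=
  let rosnaca := (PySem.List.pyRange 0 ((sekwencja.length : Int) - 1) 1).all
    (fun i => decide (PySem.List.pyGetD sekwencja i 0 ≤ PySem.List.pyGetD sekwencja (i + 1) 0))
  let malejaca := (PySem.List.pyRange 0 ((sekwencja.length : Int) - 1) 1).all
    (fun i => decide (PySem.List.pyGetD sekwencja i 0 ≥ PySem.List.pyGetD sekwencja (i + 1) 0))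
  if rosnaca && !malejaca then "Rosnący."
  else if malejaca && !rosnaca then "Malejący."
  else "Nie jest to monotoniczna sekwencja!"

-- ===== PORT B =====
-- one pass over zip(sekwencja, sekwencja[1:]) maintaining the (saw_up, saw_down) flags
def okresl_kierunek_monotonicznej_sekwencji_alt (sekwencja : List Int) : String :=
  let flags := (sekwencja.zip (PySem.List.slice sekwencja (some 1) none)).foldl
    (fun (fl : Bool × Bool) p =>
      if p.1 < p.2 then (true, fl.2)
      else if p.1 > p.2 then (fl.1, true)
      else fl) (false, false)
  if flags.1 && !flags.2 then "Rosnący."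
  else if flags.2 && !flags.1 then "Malejący."
  else "Nie jest to monotoniczna sekwencja!"

-- ===== PRECONDITION & SPEC =====
def Spec_okresl_kierunek_monotonicznej_sekwencji (sekwencja : List Int) (out : String) : Prop := out = okresl_kierunek_monotonicznej_sekwencji_alt sekwencja
instance (sekwencja : List Int) (out : String) : Decidable (Spec_okresl_kierunek_monotonicznej_sekwencji sekwencja out) := by unfold Spec_okresl_kierunek_monotonicznej_sekwencji; infer_instance

-- ===== CLAIM (what is proved, stated in full; the proofs are below) =====
def Claim_equal_okresl_kierunek_monotonicznej_sekwencji : Prop := ∀ (sekwencja : List Int), Dom_okresl_kierunek_monotonicznej_sekwencji sekwencja → Spec_okresl_kierunek_monotonicznej_sekwencji sekwencja (okresl_kierunek_monotonicznej_sekwencji sekwencja)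

-- ===== LEMMAS AND PROOFS =====

theorem all_congr_mem {α : Type} (l : List α) {p q : α → Bool} (h : ∀ a ∈ l, p a = q a) :
    l.all p = l.all q := by
  induction l with
  | nil => rfl
  | cons x t ih =>
    simp only [List.all_cons]
    rw [h x (by simp), ih (fun a ha => h a (by simp [ha]))]

theorem pyGetD_int_cons_succ (x : Int) (xs : List Int) (n : Nat) :
    PySem.List.pyGetD (x :: xs) ((n : Int) + 1) 0 = PySem.List.pyGetD xs (n : Int) 0 := by
  have e : ((n : Int) + 1) = ((n + 1 : Nat) : Int) := by push_cast; ring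
  rw [e, PySem.List.pyGetD_natCast, PySem.List.pyGetD_natCast]
  simp [List.getD]

-- A's index-based all over range(len-1) equals the all over adjacent pairs
theorem allRange_eq_allZip (f : Int → Int → Bool) (s : List Int) :
    (PySem.List.pyRange 0 ((s.length : Int) - 1) 1).all
      (fun i => f (PySem.List.pyGetD s i 0) (PySem.List.pyGetD s (i + 1) 0))
    = (s.zip s.tail).all (fun p => f p.1 p.2) := by
  induction s with
  | nil => simp [PySem.List.pyRange_one_eq_nil]
  | cons a t ih =>
    cases t with
    | nil => simp [PySem.List.pyRange_one_eq_nil]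
    | cons b u =>
      have h1 : ((a :: b :: u).length : Int) - 1 = ((b :: u).length : Int) := by simp
      have hpos : (0 : Int) < ((b :: u).length : Int) := by
        simp only [List.length_cons]; push_cast; omega
      rw [h1, PySem.List.pyRange_one_cons hpos]
      have h2 : PySem.List.pyRange (0 + 1) ((b :: u).length : Int) 1
          = (PySem.List.pyRange 0 (((b :: u).length : Int) - 1) 1).map (fun i => i + 1) := by
        rw [PySem.List.pyRange_one, PySem.List.pyRange_one]
        rw [show (((b :: u).length : Int) - (0 + 1)).toNat
            = (((b :: u).length : Int) - 1 - 0).toNat from by omega]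
        simp only [List.map_map]
        apply List.map_congr_left
        intro x hx
        simp only [Function.comp_def]
        ring
      rw [h2]
      simp only [List.all_cons, List.all_map, Function.comp_def]
      have h3 : ∀ i : Int, i ∈ PySem.List.pyRange 0 (((b :: u).length : Int) - 1) 1 →
          (f (PySem.List.pyGetD (a :: b :: u) (i + 1) 0) (PySem.List.pyGetD (a :: b :: u) (i + 1 + 1) 0))
          = (f (PySem.List.pyGetD (b :: u) i 0) (PySem.List.pyGetD (b :: u) (i + 1) 0)) := by
        intro i hi
        rw [PySem.List.mem_pyRange_one] at hi
        obtain ⟨k, rfl⟩ : ∃ k : Nat, i = (k : Int) := ⟨i.toNat, by omega⟩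
        have e1 : ((k : Int) + 1 + 1) = (((k + 1 : Nat) : Int) + 1) := by push_cast; ring
        rw [e1, pyGetD_int_cons_succ a (b :: u) k, pyGetD_int_cons_succ a (b :: u) (k + 1)]
        have e2 : (((k + 1 : Nat) : Int)) = ((k : Int) + 1) := by push_cast; ring
        rw [e2]
      rw [all_congr_mem _ h3, ih]
      have h4 : PySem.List.pyGetD (a :: b :: u) (0 + 1) 0 = b := by
        rw [show ((0 : Int) + 1) = (((0 : Nat) : Int) + 1) by norm_num,
          pyGetD_int_cons_succ a (b :: u) 0]
        simp [PySem.List.pyGetD_natCast]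
      rw [h4, PySem.List.pyGetD_zero_cons]
      rfl

-- B's fold computes the two "saw a strict step" flags
theorem foldl_flags (ps : List (Int × Int)) : ∀ u d : Bool,
    ps.foldl (fun (fl : Bool × Bool) p =>
      if p.1 < p.2 then (true, fl.2)
      else if p.1 > p.2 then (fl.1, true)
      else fl) (u, d)
    = (u || ps.any (fun p => decide (p.1 < p.2)), d || ps.any (fun p => decide (p.1 > p.2))) := by
  induction ps with
  | nil => simp
  | cons p t ih =>
    intro u d
    simp only [List.foldl_cons, List.any_cons]
    by_cases h1 : p.1 < p.2
    · simp [h1, ih, show ¬ p.1 > p.2 by omega]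
    · by_cases h2 : p.1 > p.2
      · simp [h1, h2, ih]
      · simp [h1, h2, ih]

theorem all_le_eq_not_any_gt (ps : List (Int × Int)) :
    ps.all (fun p => decide (p.1 ≤ p.2)) = !ps.any (fun p => decide (p.1 > p.2)) := by
  induction ps with
  | nil => simp
  | cons p t ih =>
    simp only [List.all_cons, List.any_cons, ih, Bool.not_or]
    congr 1
    by_cases h : p.1 ≤ p.2 <;> simp [h] <;> omega

theorem all_ge_eq_not_any_lt (ps : List (Int × Int)) :
    ps.all (fun p => decide (p.1 ≥ p.2)) = !ps.any (fun p => decide (p.1 < p.2)) := by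
  induction ps with
  | nil => simp
  | cons p t ih =>
    simp only [List.all_cons, List.any_cons, ih, Bool.not_or]
    congr 1
    by_cases h : p.1 ≥ p.2 <;> simp [h] <;> omega

-- ===== VERDICT (by name: the statement is the Claim_ definition above) =====
theorem okresl_kierunek_monotonicznej_sekwencji_spec : Claim_equal_okresl_kierunek_monotonicznej_sekwencji := by
  intro s _
  show _ = _
  unfold okresl_kierunek_monotonicznej_sekwencji okresl_kierunek_monotonicznej_sekwencji_alt
  simp only [PySem.List.slice_from_one,
    allRange_eq_allZip (fun x y => decide (x ≤ y)) s,
    allRange_eq_allZip (fun x y => decide (x ≥ y)) s,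
    foldl_flags, Bool.false_or,
    all_le_eq_not_any_gt, all_ge_eq_not_any_lt]
  set A := (s.zip s.tail).any (fun p => decide (p.1 < p.2))
  set B := (s.zip s.tail).any (fun p => decide (p.1 > p.2))
  cases A <;> cases B <;> simp
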